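-- pv_equiv track=rewrite | github.com/YexChen/study_notes | python/tetris/newgame/matris.py | getbottom
-- ===== SOURCE A (Python) =====
-- def getbottom(coors):
-- 	rv =[]
-- 	bottom = 0
-- 	for coor in coors:
-- 		if coor[0] > bottom:
-- 			bottom = coor[0]
-- 	for coor in coors:
-- 		if(coor[0] == bottom):
-- 			rv.append(coor)
-- 	return rv
-- ===== SOURCE B (Python) =====
-- def getbottom(coors):
--     groups = {}
--     for coor in coors:
--         groups.setdefault(coor[0], []).append(coor)
--     bottom = max(groups, default=0)
--     return groups.get(bottom, [])
-- ===== Notes on version B (the rewrite author's own statement) =====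
-- stated objective: alternative
-- what changed: Replaces A's two full scans (running-max pass then filter pass) by one grouping pass into a dict keyed by the first coordinate followed by a single keyed lookup of the maximum key.
-- intended difference: On nonempty inputs whose first coordinates are all negative, A returns [] because its running max is initialised to 0 and never updated, while B returns the coordinates sharing the true maximum first coordinate, which is the intended 'bottom-most' group. — e.g. on getbottom([(-1, 2)]): A returns [], B returns [(-1, 2)]
import Mathlib
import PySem

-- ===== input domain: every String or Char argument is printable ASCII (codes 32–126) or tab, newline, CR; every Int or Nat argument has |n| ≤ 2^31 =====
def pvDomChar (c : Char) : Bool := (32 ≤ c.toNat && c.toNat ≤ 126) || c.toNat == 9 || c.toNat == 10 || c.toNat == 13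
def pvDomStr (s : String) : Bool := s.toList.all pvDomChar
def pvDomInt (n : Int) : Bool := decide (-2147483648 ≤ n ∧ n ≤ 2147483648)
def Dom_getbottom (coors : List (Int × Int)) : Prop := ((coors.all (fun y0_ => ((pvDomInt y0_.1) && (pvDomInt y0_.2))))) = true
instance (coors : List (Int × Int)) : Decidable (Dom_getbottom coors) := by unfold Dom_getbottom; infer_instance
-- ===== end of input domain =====

-- B replaces A's two scans by one grouping pass into a dict keyed by the first
-- coordinate plus a single lookup of the maximum key (objective: alternative);
-- on nonempty all-negative inputs B intentionally differs from A (see D_ below).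

-- ===== PORT A =====
def getbottom (coors : List (Int × Int)) : List (Int × Int) :=
  -- bottom = 0; for coor in coors: if coor[0] > bottom: bottom = coor[0]
  let bottom := coors.foldl (fun b c => if c.1 > b then c.1 else b) 0
  -- rv = []; for coor in coors: if coor[0] == bottom: rv.append(coor)
  coors.foldl (fun rv c => if c.1 == bottom then rv ++ [c] else rv) []

-- ===== PORT B =====
def getbottom_alt (coors : List (Int × Int)) : List (Int × Int) :=
  -- groups.setdefault(coor[0], []).append(coor)
  let groups := coors.foldl (fun d c => d.modify c.1 [] (fun l => l ++ [c]))
                  (PySem.Dict.empty : PySem.Dict Int (List (Int × Int)))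
  -- bottom = max(groups, default=0)
  let bottom := (PySem.List.max? groups.keys (fun y => y)).getD 0
  -- groups.get(bottom, [])
  groups.getD bottom []

-- ===== PRECONDITION & SPEC =====
-- On nonempty inputs with all first coordinates negative, A returns [] (its
-- running max is initialised to 0 and never updated) while B returns the
-- coordinates sharing the true maximum first coordinate, the intended result.
def D_getbottom (coors : List (Int × Int)) : Prop :=
  coors ≠ [] ∧ ∀ c ∈ coors, c.1 < 0
instance (coors : List (Int × Int)) : Decidable (D_getbottom coors) := by
  unfold D_getbottom; infer_instance

def Spec_getbottom (coors : List (Int × Int)) (out : List (Int × Int)) : Prop :=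
  ¬ D_getbottom coors → out = getbottom_alt coors
instance (coors : List (Int × Int)) (out : List (Int × Int)) : Decidable (Spec_getbottom coors out) := by
  unfold Spec_getbottom; infer_instance

def pvDiffWitness_getbottom : (List (Int × Int)) := [(-1, 2)]
def pvDiffWitnessOut_getbottom : (List (Int × Int)) × (List (Int × Int)) :=
  ([], [(-1, 2)])

-- ===== CLAIM (what is proved, stated in full; the proofs are below) =====
def Claim_unchanged_getbottom : Prop :=
  ∀ (coors : List (Int × Int)), Dom_getbottom coors → Spec_getbottom coors (getbottom coors)
def Claim_changed_getbottom : Prop :=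
  Dom_getbottom (pvDiffWitness_getbottom) ∧ D_getbottom (pvDiffWitness_getbottom) ∧
  getbottom (pvDiffWitness_getbottom) = pvDiffWitnessOut_getbottom.1 ∧
  getbottom_alt (pvDiffWitness_getbottom) = pvDiffWitnessOut_getbottom.2 ∧
  pvDiffWitnessOut_getbottom.1 ≠ pvDiffWitnessOut_getbottom.2
def Claim_exact_getbottom : Prop :=
  ∀ (coors : List (Int × Int)), Dom_getbottom coors → D_getbottom coors →
    getbottom coors ≠ getbottom_alt coors

-- ===== LEMMAS AND PROOFS =====

theorem pv_foldl_max_le (l : List Int) : ∀ (a c : Int),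
    a ≤ c → (∀ x ∈ l, x ≤ c) → List.foldl max a l ≤ c := by
  induction l with
  | nil => intro a c h _; exact h
  | cons x t ih =>
    intro a c ha h
    exact ih (max a x) c (max_le ha (h x (List.mem_cons_self))) fun y hy => h y (List.mem_cons_of_mem _ hy)

-- A's running-max loop is the max-fold over the first coordinates
theorem pv_bottomA (coors : List (Int × Int)) :
    coors.foldl (fun b c => if c.1 > b then c.1 else b) 0
      = List.foldl max 0 (coors.map (·.1)) := by
  rw [List.foldl_map]
  have hf : (fun (b : Int) (c : Int × Int) => if c.1 > b then c.1 else b)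
      = fun b c => max b c.1 := by
    funext b c
    simp only [max_def]
    split_ifs <;> omega
  rw [hf]

-- the grouping dict looked up at k is the filter of coors by first coordinate k
theorem pv_groups_getD (coors : List (Int × Int)) :
    ∀ (d : PySem.Dict Int (List (Int × Int))) (k : Int),
    (coors.foldl (fun d c => d.modify c.1 [] (fun l => l ++ [c])) d).getD k []
      = d.getD k [] ++ coors.filter (fun c => c.1 == k) := by
  induction coors with
  | nil => intro d k; simp
  | cons c t ih =>
    intro d k
    simp only [List.foldl_cons, List.filter_cons]
    rw [ih]
    by_cases hk : k = c.1
    · subst hk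
      rw [PySem.Dict.getD_modify_self]
      simp [List.append_assoc]
    · rw [PySem.Dict.getD_modify_of_ne _ _ _ hk]
      have : (c.1 == k) = false := by simp [Ne.symm hk]
      simp [this]

-- membership in the keys of B's grouping dict = membership among first coordinates
theorem pv_keys_mem (coors : List (Int × Int)) (x : Int) :
    x ∈ (coors.foldl (fun d c => d.modify c.1 [] (fun l => l ++ [c]))
          (PySem.Dict.empty : PySem.Dict Int (List (Int × Int)))).keys
      ↔ x ∈ coors.map (·.1) := by
  rw [PySem.Dict.keys_foldl_modify_key, PySem.Dict.keys_empty, PySem.Set.mem_update]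
  simp

-- ===== VERDICT (by name: the statement is the Claim_ definition above) =====
theorem getbottom_spec : Claim_unchanged_getbottom := by
  intro coors _ hD
  unfold getbottom getbottom_alt
  rw [pv_groups_getD, PySem.Dict.getD_empty, List.nil_append]
  rcases hK : (PySem.List.max? (coors.foldl (fun d c => d.modify c.1 [] (fun l => l ++ [c]))
      (PySem.Dict.empty : PySem.Dict Int (List (Int × Int)))).keys (fun y => y)) with _ | m
  · -- keys empty → coors = []
    have hnil := (PySem.List.max?_eq_none_iff _ _).mp hK
    cases coors with
    | nil => simp
    | cons c t =>
      exfalso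
      have := (pv_keys_mem (c :: t) c.1).mpr (by simp)
      rw [hnil] at this; simp at this
  · -- some first coordinate is ≥ 0 (¬ D_), so A's bottom = m
    have hmemK := PySem.List.max?_mem hK
    have hmax := PySem.List.max?_isMax hK
    have hmem : m ∈ coors.map (·.1) := (pv_keys_mem coors m).mp hmemK
    have hne : coors ≠ [] := by
      intro h; subst h; simp at hmem
    have hex : ∃ c ∈ coors, 0 ≤ c.1 := by
      by_contra h
      push Not at h
      exact hD ⟨hne, fun c hc => by have := h c hc; omega⟩
    obtain ⟨c0, hc0, hc0n⟩ := hex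
    have hbA : coors.foldl (fun b c => if c.1 > b then c.1 else b) 0 = m := by
      rw [pv_bottomA]
      apply le_antisymm
      · apply pv_foldl_max_le
        · have : c0.1 ∈ coors.map (·.1) := List.mem_map_of_mem hc0
          have := hmax _ ((pv_keys_mem coors c0.1).mpr this)
          omega
        · intro x hx
          exact hmax _ ((pv_keys_mem coors x).mpr hx)
      · exact (PySem.List.le_foldl_max _ _).2 m hmem
    rw [hbA, hK]
    simp only [Option.getD_some]
    have := PySem.List.foldl_append_if (fun c : Int × Int => c.1 == m) id coors ([] : List (Int × Int))
    simpa using this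

theorem getbottom_changed : Claim_changed_getbottom := by
  unfold Claim_changed_getbottom; decide

theorem getbottom_tight : Claim_exact_getbottom := by
  intro coors _ hD h
  obtain ⟨hne, hneg⟩ := hD
  -- A returns []
  have hbA : coors.foldl (fun b c => if c.1 > b then c.1 else b) 0 = 0 := by
    rw [pv_bottomA]
    apply le_antisymm
    · apply pv_foldl_max_le _ _ _ le_rfl
      intro x hx
      obtain ⟨c, hc, rfl⟩ := List.mem_map.mp hx
      exact le_of_lt (hneg c hc)
    · exact (PySem.List.le_foldl_max _ _).1
  have hA : getbottom coors = [] := by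
    unfold getbottom
    rw [hbA]
    have := PySem.List.foldl_append_if (fun c : Int × Int => c.1 == (0 : Int)) id coors ([] : List (Int × Int))
    simp only [id, List.map_id] at this
    rw [this, List.nil_append]
    rw [List.filter_eq_nil_iff]
    intro c hc
    have := hneg c hc
    simp; omega
  -- B returns a nonempty list
  have hB : (coors.foldl (fun d c => d.modify c.1 [] (fun l => l ++ [c]))
        (PySem.Dict.empty : PySem.Dict Int (List (Int × Int)))).getD
      ((PySem.List.max? (coors.foldl (fun d c => d.modify c.1 [] (fun l => l ++ [c]))
          (PySem.Dict.empty : PySem.Dict Int (List (Int × Int)))).keys (fun y => y)).getD 0) []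
      ≠ [] := by
    rcases hK : (PySem.List.max? (coors.foldl (fun d c => d.modify c.1 [] (fun l => l ++ [c]))
        (PySem.Dict.empty : PySem.Dict Int (List (Int × Int)))).keys (fun y => y)) with _ | m
    · exfalso
      have hnil := (PySem.List.max?_eq_none_iff _ _).mp hK
      cases coors with
      | nil => exact hne rfl
      | cons c t =>
        have := (pv_keys_mem (c :: t) c.1).mpr (by simp)
        rw [hnil] at this; simp at this
    · rw [hK]
      simp only [Option.getD_some]
      rw [pv_groups_getD, PySem.Dict.getD_empty, List.nil_append]
      have hmem : m ∈ coors.map (·.1) :=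
        (pv_keys_mem coors m).mp (PySem.List.max?_mem hK)
      obtain ⟨c, hc, hcm⟩ := List.mem_map.mp hmem
      intro hnilf
      have : c ∈ coors.filter (fun c => c.1 == m) :=
        List.mem_filter.mpr ⟨hc, by simp [hcm]⟩
      rw [hnilf] at this; simp at this
  rw [hA] at h
  exact hB h.symm
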